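-- pv_equiv track=rewrite | github.com/DertjeR/bachelor_thesis | second_approach/main_two_simplified.py | add_punctuation
-- ===== SOURCE A (Python) =====
-- def add_punctuation(generated_sentences):
--     """
--     Adds punctuation to sentences derived from the CFG structure.
--
--     Args:
--         generated_sentences (list): List of words generated from sentence structures.
--
--     Returns:
--         str: The punctuated text.
--     """
--     punctuated_text = []
--     sentence = []
--
--     for word in generated_sentences:
--         sentence.append(word)
--
--         # Check if the word completes a logical sentence
--         if word in {'.', '!', '?'} or len(sentence) >= 3:  # Assume a minimal sentence size of 3
--             punctuated_text.append(" ".join(sentence) + ".")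
--             sentence = []
--
--     # Handle any remaining words (final fragment)
--     if sentence:
--         punctuated_text.append(" ".join(sentence) + ".")
--
--     return " ".join(punctuated_text)
-- ===== SOURCE B (Python) =====
-- def add_punctuation(generated_sentences):
--     """Same grouping as A, computed by cutting chunks off the front (1, 2 or 3
--     words per step) instead of folding words into a running sentence buffer."""
--     punct = ('.', '!', '?')
--     ws = generated_sentences
--     parts = []
--     i, n = 0, len(ws)
--     while i < n:
--         if ws[i] in punct:
--             chunk = ws[i:i + 1]; i += 1
--         elif i + 1 == n:
--             chunk = ws[i:i + 1]; i += 1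
--         elif ws[i + 1] in punct:
--             chunk = ws[i:i + 2]; i += 2
--         elif i + 2 == n:
--             chunk = ws[i:i + 2]; i += 2
--         else:
--             chunk = ws[i:i + 3]; i += 3
--         parts.append(" ".join(chunk) + ".")
--     return " ".join(parts)
-- ===== Notes on version B (the rewrite author's own statement) =====
-- stated objective: alternative
-- what changed: A folds every word into a running sentence buffer with a reset-on-cut accumulator; B instead consumes the list chunk by chunk, deciding the chunk length (1, 2 or 3) up front from the next words and emitting each finished sentence directly.
import Mathlib
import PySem

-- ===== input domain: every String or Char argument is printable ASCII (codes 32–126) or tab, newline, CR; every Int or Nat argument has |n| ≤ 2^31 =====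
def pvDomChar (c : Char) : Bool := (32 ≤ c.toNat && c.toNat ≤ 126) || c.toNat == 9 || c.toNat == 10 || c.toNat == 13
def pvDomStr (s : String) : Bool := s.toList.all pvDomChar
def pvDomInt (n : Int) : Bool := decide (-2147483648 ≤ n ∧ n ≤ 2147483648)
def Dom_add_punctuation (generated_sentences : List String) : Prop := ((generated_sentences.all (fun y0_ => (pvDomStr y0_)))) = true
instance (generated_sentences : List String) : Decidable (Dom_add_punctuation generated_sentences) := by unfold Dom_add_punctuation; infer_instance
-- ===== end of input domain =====

-- B consumes the word list chunk by chunk (deciding each chunk's length up front)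
-- instead of A's fold with a running sentence buffer; same cost, different decomposition.


-- word in {'.', '!', '?'}  (shared by both ports)
def pvIsP (w : String) : Bool := w == "." || w == "!" || w == "?"

-- ===== PORT A =====
-- one fold step of A's loop: append the word to the sentence buffer, emit on a cut
def pvStepA (st : List String × List String) (word : String) : List String × List String :=
  let s := st.2 ++ [word]
  if pvIsP word = true ∨ 3 ≤ s.length then (st.1 ++ [PySem.Str.join " " s ++ "."], []) else (st.1, s)

def add_punctuation (generated_sentences : List String) : String :=
  let st := generated_sentences.foldl pvStepA ([], [])
  let punctuated_text := if st.2 ≠ [] then st.1 ++ [PySem.Str.join " " st.2 ++ "."] else st.1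
  PySem.Str.join " " punctuated_text

-- ===== PORT B =====
-- cut the next chunk (1, 2 or 3 words) off the front, same branch order as Source B's loop
def pvChunks : List String → List (List String)
  | [] => []
  | a :: rest =>
    if pvIsP a then [a] :: pvChunks rest
    else match rest with
      | [] => [[a]]
      | b :: rest2 =>
        if pvIsP b then [a, b] :: pvChunks rest2
        else match rest2 with
          | [] => [[a, b]]
          | _c :: rest3 => [a, b, _c] :: pvChunks rest3

def add_punctuation_alt (generated_sentences : List String) : String :=
  PySem.Str.join " " ((pvChunks generated_sentences).map (fun c => PySem.Str.join " " c ++ "."))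

-- ===== PRECONDITION & SPEC =====
def Spec_add_punctuation (generated_sentences : List String) (out : String) : Prop := out = add_punctuation_alt generated_sentences
instance (generated_sentences : List String) (out : String) : Decidable (Spec_add_punctuation generated_sentences out) := by unfold Spec_add_punctuation; infer_instance

-- ===== CLAIM (what is proved, stated in full; the proofs are below) =====
def Claim_equal_add_punctuation : Prop := ∀ (generated_sentences : List String), Dom_add_punctuation generated_sentences → Spec_add_punctuation generated_sentences (add_punctuation generated_sentences)

-- ===== LEMMAS AND PROOFS =====

def pvRender (c : List String) : String := PySem.Str.join " " c ++ "."

def pvFinishA (st : List String × List String) : String :=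
  PySem.Str.join " " (if st.2 ≠ [] then st.1 ++ [PySem.Str.join " " st.2 ++ "."] else st.1)

-- the pending buffer carried through A's fold is always [] , [a] or [a,b] with no cut word
def pvGood (s : List String) : Prop :=
  s = [] ∨ (∃ a, s = [a] ∧ pvIsP a = false) ∨ (∃ a b, s = [a, b] ∧ pvIsP a = false ∧ pvIsP b = false)

theorem pvMain (gs : List String) : ∀ (pt s : List String), pvGood s →
    pvFinishA (gs.foldl pvStepA (pt, s)) =
      PySem.Str.join " " (pt ++ (pvChunks (s ++ gs)).map pvRender) := by
  induction gs with
  | nil =>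
    intro pt s hs
    rcases hs with h | ⟨a, h, ha⟩ | ⟨a, b, h, ha, hb⟩ <;> subst h
    · simp [pvFinishA, pvChunks]
    · simp [pvFinishA, pvChunks, pvRender, ha]
    · simp [pvFinishA, pvChunks, pvRender, ha, hb]
  | cons w gs ih =>
    intro pt s hs
    rcases hs with h | ⟨a, h, ha⟩ | ⟨a, b, h, ha, hb⟩ <;> subst h
    · by_cases hw : pvIsP w = true
      · simp only [List.foldl_cons, pvStepA, List.nil_append, List.length_cons, List.length_nil]
        rw [if_pos (Or.inl hw), ih (pt ++ [PySem.Str.join " " [w] ++ "."]) [] (Or.inl rfl)]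
        conv_rhs => rw [pvChunks.eq_def]
        simp [hw, pvRender]
      · simp only [List.foldl_cons, pvStepA, List.nil_append, List.length_cons, List.length_nil]
        rw [if_neg (by simp [hw])]
        exact ih pt [w] (Or.inr (Or.inl ⟨w, rfl, eq_false_of_ne_true hw⟩))
    · by_cases hw : pvIsP w = true
      · simp only [List.foldl_cons, pvStepA, List.cons_append, List.nil_append,
          List.length_cons, List.length_nil]
        rw [if_pos (Or.inl hw), ih (pt ++ [PySem.Str.join " " [a, w] ++ "."]) [] (Or.inl rfl)]
        conv_rhs => rw [pvChunks.eq_def]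
        simp [ha, hw, pvRender]
      · simp only [List.foldl_cons, pvStepA, List.cons_append, List.nil_append,
          List.length_cons, List.length_nil]
        rw [if_neg (by simp [hw])]
        exact ih pt [a, w] (Or.inr (Or.inr ⟨a, w, rfl, ha, eq_false_of_ne_true hw⟩))
    · simp only [List.foldl_cons, pvStepA, List.cons_append, List.nil_append,
        List.length_cons, List.length_nil]
      rw [if_pos (Or.inr (by omega)),
        ih (pt ++ [PySem.Str.join " " [a, b, w] ++ "."]) [] (Or.inl rfl)]
      conv_rhs => rw [pvChunks.eq_def]
      simp [ha, hb, pvRender]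

-- ===== VERDICT (by name: the statement is the Claim_ definition above) =====
theorem add_punctuation_spec : Claim_equal_add_punctuation := by
  intro gs _
  unfold Spec_add_punctuation add_punctuation add_punctuation_alt
  have h := pvMain gs [] [] (Or.inl rfl)
  simpa [pvFinishA, pvRender] using h
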